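-- pv_equiv track=rewrite | github.com/vishalpmittal/practice-fun | funNLearn/src/main/java/dsAlgo/list/StateOfCellsAfterDays.py | cellCompete
-- ===== SOURCE A (Python) =====
-- def cellCompete(states, days):
--     states = [0] + states + [0]
--
--     for _ in range(days):
--         prev_cell_state = 0
--         for cell in range(1, len(states) - 1):
--             curr_cell_prev_state = states[cell]
--             if prev_cell_state + states[cell + 1] in [0, 2]:
--                 states[cell] = 0
--             else:
--                 states[cell] = 1
--             prev_cell_state = curr_cell_prev_state
--
--     return states[1 : len(states) - 1]
-- ===== SOURCE B (Python) =====
-- def _step(s):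
--     # one day: each cell looks at its old neighbours (0 outside the ends)
--     if not s:
--         return []
--     return [0 if l + r in (0, 2) else 1 for l, r in zip([0] + s, s[1:] + [0])]
--
--
-- def cellCompete(states, days):
--     cur = list(states)
--     seen = {}
--     t = 0
--     while t < days:
--         key = tuple(cur)
--         if key in seen:
--             cycle = t - seen[key]
--             for _ in range((days - t) % cycle):
--                 cur = _step(cur)
--             return cur
--         seen[key] = t
--         cur = _step(cur)
--         t += 1
--     return cur
-- ===== Notes on version B (the rewrite author's own statement) =====
-- stated objective: alternative
-- what changed: B detects when the automaton state repeats (a dict of seen states) and jumps the remaining days with a modulus over the cycle length, instead of A's simulating every single day in place on a mutable padded list with index arithmetic; trades a dict of seen states for the ability to skip repeated cycles.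
import Mathlib
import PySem

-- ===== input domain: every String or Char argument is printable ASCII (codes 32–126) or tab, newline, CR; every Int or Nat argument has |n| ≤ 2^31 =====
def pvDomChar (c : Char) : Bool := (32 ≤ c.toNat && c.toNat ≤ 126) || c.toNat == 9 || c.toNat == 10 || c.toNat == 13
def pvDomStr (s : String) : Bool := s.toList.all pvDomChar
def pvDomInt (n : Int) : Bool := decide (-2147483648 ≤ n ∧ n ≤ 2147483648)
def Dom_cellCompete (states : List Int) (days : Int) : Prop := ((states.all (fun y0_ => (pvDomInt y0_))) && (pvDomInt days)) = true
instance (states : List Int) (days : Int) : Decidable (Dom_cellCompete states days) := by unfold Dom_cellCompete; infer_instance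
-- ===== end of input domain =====

-- B replaces A's in-place day-by-day index simulation by cycle detection on the sequence of
-- states (a dict of seen states), jumping the remaining days modulo the cycle length once a
-- state repeats (objective: alternative algorithm).


-- ===== PORT A =====
-- inner-loop body of A; the indices cell and cell+1 are always in range (1 ≤ cell ≤ len-2),
-- so the total forms pyGetD/pySetD are exact here
def cellCompeteInner (p : List Int × Int) (cell : Int) : List Int × Int :=
  let st := p.1
  let prev := p.2
  let curr := PySem.List.pyGetD st cell 0
  let st' := if prev + PySem.List.pyGetD st (cell + 1) 0 = 0 ∨
                prev + PySem.List.pyGetD st (cell + 1) 0 = 2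
             then PySem.List.pySetD st cell 0
             else PySem.List.pySetD st cell 1
  (st', curr)

def cellCompete (states : List Int) (days : Int) : List Int :=
  let st0 := [0] ++ states ++ [0]
  let stN := (PySem.List.pyRange 0 days 1).foldl
    (fun st _ =>
      ((PySem.List.pyRange 1 ((st.length : Int) - 1) 1).foldl cellCompeteInner (st, 0)).1)
    st0
  PySem.List.slice stN (some 1) (some ((stN.length : Int) - 1))

-- ===== PORT B =====
-- _step from Source B: zip of the two shifted copies
def cellCompeteStep (s : List Int) : List Int :=
  if s = [] then []
  else (List.zip ([0] ++ s) (PySem.List.slice s (some 1) none ++ [0])).map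
    (fun lr => if lr.1 + lr.2 = 0 ∨ lr.1 + lr.2 = 2 then 0 else 1)

-- the while-loop of Source B; fuel = days - t, which the loop guard 't < days' bounds
def cellCompeteLoop (days : Int) : Nat → PySem.Dict (List Int) Int → Int → List Int → List Int
  | 0, _, _, cur => cur
  | r + 1, seen, t, cur =>
    match PySem.Dict.get? seen cur with
    | some t0 =>
        (PySem.List.pyRange 0 (PySem.Int.mod (days - t) (t - t0)) 1).foldl
          (fun c _ => cellCompeteStep c) cur
    | none => cellCompeteLoop days r (PySem.Dict.insert seen cur t) (t + 1) (cellCompeteStep cur)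

def cellCompete_alt (states : List Int) (days : Int) : List Int :=
  cellCompeteLoop days days.toNat PySem.Dict.empty 0 states

-- ===== PRECONDITION & SPEC =====
def Spec_cellCompete (states : List Int) (days : Int) (out : List Int) : Prop := out = cellCompete_alt states days
instance (states : List Int) (days : Int) (out : List Int) : Decidable (Spec_cellCompete states days out) := by unfold Spec_cellCompete; infer_instance

-- ===== CLAIM (what is proved, stated in full; the proofs are below) =====
def Claim_equal_cellCompete : Prop := ∀ (states : List Int) (days : Int), Dom_cellCompete states days → Spec_cellCompete states days (cellCompete states days)

-- ===== LEMMAS AND PROOFS =====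

-- reference recursion for one day: each cell from old left value p and old right value (head of rest)
def pvStepRec (p : Int) : List Int → List Int
  | [] => []
  | x :: rest =>
      (if p + rest.headD 0 = 0 ∨ p + rest.headD 0 = 2 then 0 else 1) :: pvStepRec x rest

-- reference recursion for A's inner pass over the padded list: last element (the right pad) untouched
def pvPassAux (p : Int) : List Int → List Int
  | [] => []
  | [b] => [b]
  | x :: y :: rest => (if p + y = 0 ∨ p + y = 2 then 0 else 1) :: pvPassAux x (y :: rest)

lemma pvStepRec_cons (p x : Int) (rest : List Int) :
    pvStepRec p (x :: rest) =
      (if p + rest.headD 0 = 0 ∨ p + rest.headD 0 = 2 then 0 else 1) :: pvStepRec x rest := rfl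

lemma pvPassAux_cons2 (p x y : Int) (rest : List Int) :
    pvPassAux p (x :: y :: rest) =
      (if p + y = 0 ∨ p + y = 2 then 0 else 1) :: pvPassAux x (y :: rest) := rfl

lemma pvZip_eq_stepRec (s : List Int) : ∀ (p : Int), s ≠ [] →
    (List.zip (p :: s) (s.tail ++ [0])).map
      (fun lr => if lr.1 + lr.2 = 0 ∨ lr.1 + lr.2 = 2 then (0:Int) else 1) = pvStepRec p s := by
  induction s with
  | nil => intro p h; simp at h
  | cons x tl ih =>
    intro p _
    cases tl with
    | nil => simp [pvStepRec]
    | cons y r =>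
      have hih := ih x (by simp)
      simp only [List.tail_cons] at hih
      rw [List.tail_cons, List.cons_append, List.zip_cons_cons, List.map_cons, hih]
      simp [pvStepRec_cons]

lemma pvStep_eq_stepRec (s : List Int) : cellCompeteStep s = pvStepRec 0 s := by
  by_cases h : s = []
  · subst h; simp [cellCompeteStep, pvStepRec]
  · unfold cellCompeteStep
    rw [if_neg h, PySem.List.slice_from_one]
    exact pvZip_eq_stepRec s 0 h

lemma pvPassAux_append_zero (m : List Int) : ∀ (p : Int),
    pvPassAux p (m ++ [0]) = pvStepRec p m ++ [0] := by
  induction m with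
  | nil => intro p; simp [pvPassAux, pvStepRec]
  | cons x tl ih =>
    intro p
    cases tl with
    | nil => simp [pvPassAux, pvStepRec]
    | cons y r =>
      rw [List.cons_append, List.cons_append, pvPassAux_cons2, pvStepRec_cons, List.headD_cons,
          List.cons_append, ← List.cons_append, ih x]

lemma pvGetD_append_len {α : Type} (l : List α) (x : α) (rest : List α) (d : α) :
    (l ++ x :: rest).getD l.length d = x := by
  simp [List.getD]

lemma pvGetD_append_len_succ {α : Type} (l : List α) (x y : α) (rest : List α) (d : α) :
    (l ++ x :: y :: rest).getD (l.length + 1) d = y := by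
  simp [List.getD]

lemma pvSet_append_len {α : Type} (l : List α) (x v : α) (rest : List α) :
    (l ++ x :: rest).set l.length v = l ++ v :: rest := by
  induction l with
  | nil => simp
  | cons a tl ih => simp [ih]

-- A's inner index loop, started at position done.length of done ++ rest with carried prev,
-- rewrites rest (except its last element) as pvPassAux does
lemma pvInner_pass (rest : List Int) : ∀ (done : List Int) (prev : Int),
    ((PySem.List.pyRange (done.length : Int) ((done.length : Int) + rest.length - 1) 1).foldl
      cellCompeteInner (done ++ rest, prev)).1 = done ++ pvPassAux prev rest := by
  induction rest with
  | nil =>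
    intro done prev
    rw [PySem.List.pyRange_one_eq_nil (by simp only [List.length_nil]; omega)]
    simp [pvPassAux]
  | cons x tl ih =>
    intro done prev
    cases tl with
    | nil =>
      rw [PySem.List.pyRange_one_eq_nil
            (by simp only [List.length_cons, List.length_nil]; omega)]
      simp [pvPassAux]
    | cons y r =>
      rw [PySem.List.pyRange_one_cons (by simp; omega)]
      simp only [List.foldl_cons]
      have hbody : cellCompeteInner (done ++ x :: y :: r, prev) (done.length : Int) =
          ((done ++ [if prev + y = 0 ∨ prev + y = 2 then 0 else 1]) ++ (y :: r), x) := by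
        unfold cellCompeteInner
        simp only [PySem.List.pyGetD_natCast]
        rw [show ((done.length : Int) + 1) = ((done.length + 1 : Nat) : Int) by push_cast; ring]
        simp only [PySem.List.pyGetD_natCast, PySem.List.pySetD_natCast]
        rw [pvGetD_append_len, pvGetD_append_len_succ]
        by_cases h : prev + y = 0 ∨ prev + y = 2
        · rw [if_pos h, if_pos h, pvSet_append_len]; simp
        · rw [if_neg h, if_neg h, pvSet_append_len]; simp
      rw [hbody]
      have hstart : ((done.length : Int) + 1) =
          (((done ++ [if prev + y = 0 ∨ prev + y = 2 then 0 else 1]).length : Nat) : Int) := by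
        push_cast [List.length_append, List.length_cons, List.length_nil]; ring
      have hstop : ((done.length : Int) + ((x :: y :: r).length : Nat) - 1) =
          (((done ++ [if prev + y = 0 ∨ prev + y = 2 then 0 else 1]).length : Nat) : Int) +
            (((y :: r).length : Nat) : Int) - 1 := by
        push_cast [List.length_append, List.length_cons, List.length_nil]; ring
      rw [hstart, hstop, ih]
      simp [pvPassAux_cons2]

-- one day of A on the padded list = padded cellCompeteStep
lemma pvDay_padded (m : List Int) :
    ((PySem.List.pyRange 1 (((([0] ++ m ++ [0]) : List Int).length : Int) - 1) 1).foldl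
      cellCompeteInner (([0] ++ m ++ [0] : List Int), 0)).1 = [0] ++ cellCompeteStep m ++ [0] := by
  have h := pvInner_pass (m ++ [0]) [0] 0
  rw [pvPassAux_append_zero, ← pvStep_eq_stepRec] at h
  simp only [List.length_append, List.length_cons, List.length_nil, List.append_assoc,
    Nat.cast_add, Nat.cast_one, Nat.cast_zero] at h ⊢
  ring_nf at h ⊢
  exact h

lemma pvFoldl_iterate {α β : Type} (g : α → α) (l : List β) :
    ∀ (init : α), l.foldl (fun s _ => g s) init = g^[l.length] init := by
  induction l with
  | nil => intro init; simp
  | cons x tl ih =>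
    intro init
    simp only [List.foldl_cons, List.length_cons, ih, Function.iterate_succ_apply]

-- iterating A's day body on a padded list = padding the iterate of cellCompeteStep
lemma pvIter_padded (d : Nat) : ∀ (m : List Int),
    (fun st => ((PySem.List.pyRange 1 ((st.length : Int) - 1) 1).foldl cellCompeteInner (st, 0)).1)^[d]
      ([0] ++ m ++ [0]) = [0] ++ cellCompeteStep^[d] m ++ [0] := by
  induction d with
  | zero => intro m; simp
  | succ n ih =>
    intro m
    rw [Function.iterate_succ_apply, Function.iterate_succ_apply]
    rw [pvDay_padded m]
    exact ih (cellCompeteStep m)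

lemma pvSlice_mid (w : List Int) :
    PySem.List.slice ([0] ++ w ++ [0] : List Int) (some 1)
      (some (((([0] ++ w ++ [0] : List Int)).length : Int) - 1)) = w := by
  rw [show (((([0] ++ w ++ [0] : List Int)).length : Int) - 1) = ((w.length + 1 : Nat) : Int) by
        push_cast [List.length_append, List.length_cons, List.length_nil]; ring]
  rw [show ((1:Int)) = ((1:Nat) : Int) by norm_num, PySem.List.slice_natCast]
  simp

-- characterisation of A: it computes the days-fold of cellCompeteStep (toNat clamps negative days to 0)
lemma pvA_char (states : List Int) (days : Int) :
    cellCompete states days = cellCompeteStep^[days.toNat] states := by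
  unfold cellCompete
  simp only
  rw [pvFoldl_iterate, PySem.List.length_pyRange_one]
  rw [show (days - 0 : Int) = days by ring]
  rw [pvIter_padded days.toNat states, pvSlice_mid]

lemma pvPeriod (F : List Int → List Int) (u : List Int) (c : Nat) (hc : 0 < c)
    (hu : F^[c] u = u) : ∀ k, F^[k] u = F^[k % c] u := by
  intro k
  induction k using Nat.strong_induction_on with
  | _ k ih =>
    by_cases hk : k < c
    · rw [Nat.mod_eq_of_lt hk]
    · have h1 : k = (k - c) + c := by omega
      calc F^[k] u = F^[(k - c) + c] u := by rw [← h1]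
        _ = F^[k - c] (F^[c] u) := by rw [Function.iterate_add_apply]
        _ = F^[k - c] u := by rw [hu]
        _ = F^[(k - c) % c] u := ih (k - c) (by omega)
        _ = F^[k % c] u := by rw [← Nat.mod_eq_sub_mod (by omega)]

-- correctness of B's while loop
lemma pvLoop_correct (days : Int) : ∀ (rem : Nat) (seen : PySem.Dict (List Int) Int) (t : Int)
    (cur s0 : List Int),
    0 ≤ t → t ≤ days → rem = (days - t).toNat →
    cur = cellCompeteStep^[t.toNat] s0 →
    (∀ v j, seen.get? v = some j → 0 ≤ j ∧ j < t ∧ cellCompeteStep^[j.toNat] s0 = v) →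
    cellCompeteLoop days rem seen t cur = cellCompeteStep^[days.toNat] s0 := by
  intro rem
  induction rem with
  | zero =>
    intro seen t cur s0 ht htd hrem hcur _
    have : t = days := by omega
    subst this
    simpa [cellCompeteLoop] using hcur
  | succ r ih =>
    intro seen t cur s0 ht htd hrem hcur hseen
    have htlt : t < days := by omega
    unfold cellCompeteLoop
    cases hget : PySem.Dict.get? seen cur with
    | none =>
      dsimp only
      apply ih _ (t + 1) _ s0 (by omega) (by omega) (by omega)
      · rw [hcur, show (t + 1).toNat = t.toNat + 1 by omega, Function.iterate_succ_apply']
      · intro v j hvj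
        rw [PySem.Dict.get?_insert] at hvj
        by_cases hv : v = cur
        · rw [if_pos hv] at hvj
          obtain rfl : t = j := by injection hvj
          exact ⟨ht, by omega, by rw [← hcur]; exact hv.symm⟩
        · rw [if_neg hv] at hvj
          obtain ⟨h1, h2, h3⟩ := hseen v j hvj
          exact ⟨h1, by omega, h3⟩
    | some t0 =>
      dsimp only
      obtain ⟨h0, hlt, heq⟩ := hseen cur t0 hget
      rw [pvFoldl_iterate, PySem.List.length_pyRange_one]
      have hcpos : 0 < t.toNat - t0.toNat := by omega
      have e1 : days - t = ((days.toNat - t.toNat : Nat) : Int) := by omega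
      have e2 : t - t0 = ((t.toNat - t0.toNat : Nat) : Int) := by omega
      have hM : (PySem.Int.mod (days - t) (t - t0) - 0).toNat
          = (days.toNat - t.toNat) % (t.toNat - t0.toNat) := by
        rw [PySem.Int.mod_eq_emod_of_pos (by omega), e1, e2, ← Int.natCast_mod]
        omega
      have hu : cellCompeteStep^[t.toNat - t0.toNat] (cellCompeteStep^[t0.toNat] s0)
          = cellCompeteStep^[t0.toNat] s0 := by
        rw [← Function.iterate_add_apply,
            show (t.toNat - t0.toNat) + t0.toNat = t.toNat by omega, ← hcur]
        exact heq.symm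
      have hper := pvPeriod cellCompeteStep _ _ hcpos hu
      have hgoal : cellCompeteStep^[days.toNat] s0
          = cellCompeteStep^[(days.toNat - t.toNat) % (t.toNat - t0.toNat)]
              (cellCompeteStep^[t0.toNat] s0) := by
        conv_lhs => rw [show days.toNat = (days.toNat - t0.toNat) + t0.toNat by omega]
        rw [Function.iterate_add_apply, hper (days.toNat - t0.toNat),
            show days.toNat - t0.toNat = (days.toNat - t.toNat) + (t.toNat - t0.toNat) by omega,
            Nat.add_mod_right]
      rw [hM, show cur = cellCompeteStep^[t0.toNat] s0 from heq.symm]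
      exact hgoal.symm

-- ===== VERDICT (by name: the statement is the Claim_ definition above) =====
theorem cellCompete_spec : Claim_equal_cellCompete := by
  intro states days _
  unfold Spec_cellCompete
  rw [pvA_char]
  unfold cellCompete_alt
  by_cases h : days ≤ 0
  · rw [show days.toNat = 0 by omega]
    simp [cellCompeteLoop]
  · rw [pvLoop_correct days days.toNat PySem.Dict.empty 0 states states (by omega) (by omega)
        (by omega) (by simp) (by intro v j hvj; simp [PySem.Dict.get?_empty] at hvj)]
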